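-- pv_equiv track=rewrite | github.com/miliar/Code_Jam_Webscraper | Solutions_python/Problem_78/155.py | solve
-- ===== SOURCE A (Python) =====
-- def solve(N,PD,PG):
-- 	if PG==0:
-- 		if PD>0:
-- 			return "Broken"
-- 		else:
-- 			return "Possible"
-- 	if PG==100:
-- 		if PD!=100:
-- 			return "Broken"
-- 		else:
-- 			return "Possible"
-- 	if N>=100:
-- 		return "Possible"
-- 	ok=False
-- 	for D in range(N+1):
-- 		if str(PD*D)[-2:]=="00":
-- 			ok=True
-- 			#print PD,D
-- 		#print "N,PD,D,PD*D=WD",N,PD,D,PD*D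
--
-- 	if ok:
-- 		return "Possible"
-- 	return "Broken"
-- ===== SOURCE B (Python) =====
-- def solve(N, PD, PG):
--     # Same guards as the original; the final scan over D is replaced by a
--     # closed-form divisibility test: the loop succeeds iff the minimal D>=1
--     # with 100 | PD*D (namely 100 // gcd(|PD|, 100)) is <= N.
--     if PG == 0:
--         return "Broken" if PD > 0 else "Possible"
--     if PG == 100:
--         return "Possible" if PD == 100 else "Broken"
--     if N >= 100:
--         return "Possible"
--     if PD == 0:
--         return "Broken"
--     a, b = abs(PD) % 100, 100
--     while a:
--         a, b = b % a, a
--     return "Possible" if 100 // b <= N else "Broken"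
-- ===== Notes on version B (the rewrite author's own statement) =====
-- stated objective: simpler
-- what changed: A's scan over all D in range(N+1) testing str(PD*D)[-2:]=='00' is replaced by a closed-form number-theory test: PD*D is a nonzero multiple of 100 for some D in [1,N] iff PD != 0 and 100//gcd(|PD|,100) <= N, computed with one Euclid gcd loop.
import Mathlib
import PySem

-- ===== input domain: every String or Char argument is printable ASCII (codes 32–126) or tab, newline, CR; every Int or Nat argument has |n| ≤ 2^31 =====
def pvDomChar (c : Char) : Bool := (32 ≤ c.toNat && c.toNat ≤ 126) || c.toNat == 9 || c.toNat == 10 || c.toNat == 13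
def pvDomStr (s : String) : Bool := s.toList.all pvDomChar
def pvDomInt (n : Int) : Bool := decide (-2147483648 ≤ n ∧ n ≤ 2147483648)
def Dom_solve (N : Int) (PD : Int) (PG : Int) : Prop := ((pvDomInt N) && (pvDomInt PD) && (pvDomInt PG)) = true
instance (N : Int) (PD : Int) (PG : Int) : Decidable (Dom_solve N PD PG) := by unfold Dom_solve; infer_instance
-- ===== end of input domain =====

-- B replaces A's scan over D in range(N+1) by the closed-form test
-- "100 // gcd(|PD|, 100) <= N" (simpler, no scan); same guards, same return value.

-- ===== PORT A =====
-- str(PD*D)[-2:] == "00" ported via PySem.Int.toStr and PySem.Str.slice.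
def solve (N : Int) (PD : Int) (PG : Int) : String :=
  if PG = 0 then
    (if PD > 0 then "Broken" else "Possible")
  else if PG = 100 then
    (if PD ≠ 100 then "Broken" else "Possible")
  else if N ≥ 100 then "Possible"
  else
    let ok := (PySem.List.pyRange 0 (N + 1) 1).foldl
      (fun ok D =>
        if PySem.Str.slice (PySem.Int.toStr (PD * D)) (some (-2)) none = "00" then true
        else ok) false
    if ok then "Possible" else "Broken"

-- ===== PORT B =====
-- Source B's hand-written Euclid loop 'while a: a, b = b % a, a'; its operands
-- abs(PD) % 100 and 100 are nonnegative, so the loop state is carried as Nat.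
def solveAltGcdLoop (a b : Nat) : Nat :=
  if h : a = 0 then b else solveAltGcdLoop (b % a) a
termination_by a
decreasing_by exact Nat.mod_lt _ (Nat.pos_of_ne_zero h)

def solve_alt (N : Int) (PD : Int) (PG : Int) : String :=
  if PG = 0 then
    (if PD > 0 then "Broken" else "Possible")
  else if PG = 100 then
    (if PD = 100 then "Possible" else "Broken")
  else if N ≥ 100 then "Possible"
  else if PD = 0 then "Broken"
  -- a, b = abs(PD) % 100, 100 ; while a: a, b = b % a, a  (the loop leaves gcd in b);
  -- 100 // b <= N: both operands are nonnegative, so '//' is Nat division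
  else if ((100 / solveAltGcdLoop (PySem.Int.mod |PD| 100).toNat 100 : Nat) : Int) ≤ N then
    "Possible"
  else "Broken"

-- ===== PRECONDITION & SPEC =====
def Spec_solve (N : Int) (PD : Int) (PG : Int) (out : String) : Prop := out = solve_alt N PD PG
instance (N : Int) (PD : Int) (PG : Int) (out : String) : Decidable (Spec_solve N PD PG out) := by unfold Spec_solve; infer_instance

-- ===== CLAIM (what is proved, stated in full; the proofs are below) =====
def Claim_equal_solve : Prop := ∀ (N : Int) (PD : Int) (PG : Int), Dom_solve N PD PG → Spec_solve N PD PG (solve N PD PG)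

-- ===== LEMMAS AND PROOFS =====

-- Decimal representation of a Nat, structurally (most significant digit first);
-- equals Nat.toDigits 10 (proved below), but with a recursion the proofs can follow.
def pvRep (n : Nat) : List Char :=
  if h : n < 10 then [Nat.digitChar n]
  else pvRep (n / 10) ++ [Nat.digitChar (n % 10)]
termination_by n
decreasing_by exact Nat.div_lt_self (by omega) (by omega)

lemma pvRep_small {n : Nat} (h : n < 10) : pvRep n = [Nat.digitChar n] := by
  rw [pvRep]; simp [h]

lemma pvRep_step {n : Nat} (h : ¬ n < 10) :
    pvRep n = pvRep (n / 10) ++ [Nat.digitChar (n % 10)] := by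
  rw [pvRep]; simp [h]

lemma toDigitsCore_eq_pvRep :
    ∀ (f n : Nat) (acc : List Char), n < f →
      Nat.toDigitsCore 10 f n acc = pvRep n ++ acc := by
  intro f
  induction f with
  | zero => omega
  | succ f ih =>
    intro n acc hn
    simp only [Nat.toDigitsCore]
    by_cases h : n / 10 = 0
    · have hlt : n < 10 := by omega
      rw [pvRep_small hlt, h]
      simp [Nat.mod_eq_of_lt hlt]
    · have hge : ¬ n < 10 := by omega
      rw [if_neg h, ih (n / 10) _ (by omega), pvRep_step hge]
      simp

lemma toDigits_eq_pvRep (n : Nat) : Nat.toDigits 10 n = pvRep n := by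
  have := toDigitsCore_eq_pvRep (n + 1) n [] (by omega)
  simpa [Nat.toDigits] using this

lemma pvRep_ne_nil (n : Nat) : pvRep n ≠ [] := by
  by_cases h : n < 10
  · rw [pvRep_small h]; simp
  · rw [pvRep_step h]; simp

lemma pvRep_length_pos (n : Nat) : 1 ≤ (pvRep n).length := by
  have := pvRep_ne_nil n
  cases hr : pvRep n with
  | nil => exact absurd hr this
  | cons a l => simp

lemma digitChar_eq_zero_iff {d : Nat} (h : d < 10) : Nat.digitChar d = '0' ↔ d = 0 := by
  interval_cases d <;> simp [Nat.digitChar]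

-- last two characters of the decimal string of n are "00" iff n is a nonzero multiple of 100
lemma pvRep_lastTwo (n : Nat) :
    (pvRep n).drop ((pvRep n).length - 2) = ['0', '0'] ↔ (n ≠ 0 ∧ 100 ∣ n) := by
  by_cases h1 : n < 10
  · rw [pvRep_small h1]
    constructor
    · intro h; simp at h
    · rintro ⟨hn0, hdvd⟩; omega
  · by_cases h2 : n < 100
    · have hq : n / 10 < 10 := by omega
      have hq0 : n / 10 ≠ 0 := by omega
      rw [pvRep_step h1, pvRep_small hq]
      simp only [List.length_append, List.length_cons, List.length_nil]
      constructor
      · intro h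
        have := (digitChar_eq_zero_iff hq).mp (by
          have := congrArg (fun l => l.headI) h
          simpa using this)
        omega
      · rintro ⟨hn0, hdvd⟩; omega
    · -- n ≥ 100: pvRep n = pvRep (n/100) ++ [digit (n/10 % 10), digit (n % 10)]
      have h10 : ¬ n / 10 < 10 := by omega
      have hsplit : pvRep n = pvRep (n / 10 / 10) ++
          [Nat.digitChar (n / 10 % 10), Nat.digitChar (n % 10)] := by
        rw [pvRep_step h1, pvRep_step h10, List.append_assoc]
        rfl
      rw [hsplit]
      have hlen : (pvRep (n / 10 / 10) ++
          [Nat.digitChar (n / 10 % 10), Nat.digitChar (n % 10)]).length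
          = (pvRep (n / 10 / 10)).length + 2 := by simp
      rw [hlen, Nat.add_sub_cancel, List.drop_left]
      constructor
      · intro h
        have e1 : Nat.digitChar (n / 10 % 10) = '0' := by
          have := congrArg (fun l => l.headI) h; simpa using this
        have e2 : Nat.digitChar (n % 10) = '0' := by
          have := congrArg (fun l => l.tail.headI) h; simpa using this
        have d1 := (digitChar_eq_zero_iff (Nat.mod_lt _ (by omega))).mp e1
        have d2 := (digitChar_eq_zero_iff (Nat.mod_lt _ (by omega))).mp e2
        exact ⟨by omega, by omega⟩
      · rintro ⟨-, hdvd⟩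
        have h1' : n / 10 % 10 = 0 := by omega
        have h2' : n % 10 = 0 := by omega
        rw [h1', h2']
        rfl

-- the same fact lifted to Python's str(x)[-2:] == "00" on Int
lemma toChars_lastTwo (x : Int) :
    PySem.List.slice (PySem.Int.toChars x) (some (-2)) none = ['0', '0']
      ↔ (x ≠ 0 ∧ (100 : Int) ∣ x) := by
  rw [PySem.List.slice_from_neg_ofNat _ 2 (by omega)]
  have hdvd : ((100 : Nat) ∣ x.natAbs) ↔ ((100 : Int) ∣ x) := by
    have := @Int.natAbs_dvd_natAbs 100 x
    simpa using this
  simp only [PySem.Int.toChars]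
  by_cases hx : x < 0
  · rw [if_pos hx]
    have hm1 : 1 ≤ x.natAbs := by omega
    set m := x.natAbs with hm
    rw [toDigits_eq_pvRep]
    by_cases hsmall : m < 10
    · rw [pvRep_small hsmall]
      constructor
      · intro h; simp at h
      · rintro ⟨-, hdd⟩
        exfalso
        have : (100 : Nat) ∣ m := hdvd.mpr hdd
        omega
    · have hlen2 : 2 ≤ (pvRep m).length := by
        rw [pvRep_step hsmall]
        have := pvRep_length_pos (m / 10)
        simp; omega
      have hdropeq : ('-' :: pvRep m).drop (('-' :: pvRep m).length - 2)
          = (pvRep m).drop ((pvRep m).length - 2) := by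
        have : ('-' :: pvRep m).length - 2 = ((pvRep m).length - 2) + 1 := by
          simp; omega
        rw [this, List.drop_succ_cons]
      rw [hdropeq, pvRep_lastTwo]
      constructor
      · rintro ⟨hm0, hdd⟩
        exact ⟨by omega, hdvd.mp (by simpa [hm] using hdd)⟩
      · rintro ⟨hx0, hdd⟩
        exact ⟨by omega, by simpa [hm] using hdvd.mpr hdd⟩
  · rw [if_neg hx]
    have htn : x.toNat = x.natAbs := by omega
    rw [toDigits_eq_pvRep, htn, pvRep_lastTwo]
    constructor
    · rintro ⟨hm0, hdd⟩
      exact ⟨by omega, hdvd.mp hdd⟩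
    · rintro ⟨hx0, hdd⟩
      exact ⟨by omega, hdvd.mpr hdd⟩

lemma string_eq_iff_toList (s t : String) : s = t ↔ s.toList = t.toList := by
  constructor
  · intro h; rw [h]
  · intro h
    have h1 := congrArg String.ofList h
    simpa using h1

-- A's accumulator loop is List.any
lemma foldl_ite_any (l : List Int) (p : Int → Prop) [DecidablePred p] (b : Bool) :
    l.foldl (fun ok D => if p D then true else ok) b = (b || l.any (fun D => decide (p D))) := by
  induction l generalizing b with
  | nil => simp
  | cons a l ih =>
    simp only [List.foldl_cons, List.any_cons, ih]
    by_cases h : p a <;> simp [h]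

lemma solveAltGcdLoop_eq_gcd (a b : Nat) : solveAltGcdLoop a b = Nat.gcd a b := by
  induction a using Nat.strong_induction_on generalizing b with
  | _ a ih =>
    rw [solveAltGcdLoop]
    by_cases h : a = 0
    · simp [h]
    · rw [dif_neg h, ih (b % a) (Nat.mod_lt b (Nat.pos_of_ne_zero h)) a, ← Nat.gcd_rec]

-- 100 | p * d  ↔  (100 / gcd p 100) | d   (p ≠ 0)
lemma dvd_hundred_mul_iff (p d : Nat) (hp : p ≠ 0) :
    (100 ∣ p * d) ↔ (100 / Nat.gcd p 100) ∣ d := by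
  set g := Nat.gcd p 100 with hg
  have hgpos : 0 < g := Nat.gcd_pos_of_pos_left _ (by omega)
  have hgp : g ∣ p := Nat.gcd_dvd_left _ _
  have hg100 : g ∣ 100 := Nat.gcd_dvd_right _ _
  have h100 : g * (100 / g) = 100 := Nat.mul_div_cancel' hg100
  have hpq : g * (p / g) = p := Nat.mul_div_cancel' hgp
  have hco : (p / g).Coprime (100 / g) := Nat.coprime_div_gcd_div_gcd hgpos
  constructor
  · intro h
    have h2 : g * (100 / g) ∣ g * ((p / g) * d) := by
      rw [h100, ← Nat.mul_assoc, hpq]; exact h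
    have h3 : (100 / g) ∣ (p / g) * d := (Nat.mul_dvd_mul_iff_left hgpos).mp h2
    exact (Nat.Coprime.dvd_of_dvd_mul_left (Nat.Coprime.symm hco) h3)
  · intro h
    have h2 : (100 / g) ∣ (p / g) * d := Dvd.dvd.mul_left h _
    have h3 : g * (100 / g) ∣ g * ((p / g) * d) := Nat.mul_dvd_mul_left g h2
    rwa [h100, ← Nat.mul_assoc, hpq] at h3

lemma gcd_mod_hundred (p : Nat) : Nat.gcd (p % 100) 100 = Nat.gcd p 100 := by
  rw [← Nat.gcd_rec, Nat.gcd_comm]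

-- the B-side gcd argument, rewritten
lemma gcd_arg_eq (PD : Int) : (PySem.Int.mod |PD| 100).toNat = PD.natAbs % 100 := by
  have h : PySem.Int.mod |PD| 100 = |PD| % 100 := PySem.Int.mod_eq_emod_of_pos (by omega)
  have habs : |PD| = (PD.natAbs : Int) := by
    rcases abs_cases PD with ⟨h1, h2⟩ | ⟨h1, h2⟩ <;> omega
  rw [h, habs]
  omega

-- core equivalence of the two final branches
lemma loop_iff (N PD : Int) :
    ((PySem.List.pyRange 0 (N + 1) 1).foldl
      (fun ok D =>
        if PySem.Str.slice (PySem.Int.toStr (PD * D)) (some (-2)) none = "00" then true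
        else ok) false) = true
    ↔ (PD ≠ 0 ∧ ((100 / solveAltGcdLoop (PySem.Int.mod |PD| 100).toNat 100 : Nat) : Int) ≤ N) := by
  rw [foldl_ite_any, Bool.false_or, List.any_eq_true]
  have hcond : ∀ D : Int,
      (PySem.Str.slice (PySem.Int.toStr (PD * D)) (some (-2)) none = "00")
        ↔ (PD * D ≠ 0 ∧ (100 : Int) ∣ PD * D) := by
    intro D
    rw [string_eq_iff_toList, PySem.Str.toList_slice, PySem.Chars.slice_eq_listSlice,
      PySem.Int.toList_toStr]
    exact toChars_lastTwo (PD * D)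
  rw [gcd_arg_eq, solveAltGcdLoop_eq_gcd, gcd_mod_hundred]
  set p := PD.natAbs with hp
  set k := 100 / Nat.gcd p 100 with hk
  have hkpos : 1 ≤ k := by
    rw [hk]
    have hgpos : 0 < Nat.gcd p 100 := Nat.gcd_pos_of_pos_right _ (by omega)
    have hgle : Nat.gcd p 100 ≤ 100 := Nat.le_of_dvd (by omega) (Nat.gcd_dvd_right _ _)
    exact (Nat.one_le_div_iff hgpos).mpr hgle
  constructor
  · rintro ⟨D, hmem, hD⟩
    rw [PySem.List.mem_pyRange_one] at hmem
    rw [decide_eq_true_iff, hcond D] at hD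
    obtain ⟨hx0, hdd⟩ := hD
    have hPD : PD ≠ 0 := fun h => hx0 (by rw [h]; ring)
    have hD0 : D ≠ 0 := fun h => hx0 (by rw [h]; ring)
    have hDpos : 1 ≤ D := by omega
    refine ⟨hPD, ?_⟩
    have hnat : (100 : Nat) ∣ p * D.toNat := by
      have := (@Int.natAbs_dvd_natAbs 100 (PD * D)).mpr hdd
      have habs : (PD * D).natAbs = p * D.toNat := by
        rw [Int.natAbs_mul, hp]
        congr 1
        omega
      simpa [habs] using this
    have hkdvd : k ∣ D.toNat := (dvd_hundred_mul_iff p D.toNat (by omega)).mp hnat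
    have hkle : k ≤ D.toNat := Nat.le_of_dvd (by omega) hkdvd
    omega
  · rintro ⟨hPD, hkN⟩
    refine ⟨(k : Int), ?_, ?_⟩
    · rw [PySem.List.mem_pyRange_one]; omega
    · rw [decide_eq_true_iff, hcond]
      constructor
      · have : (k : Int) ≠ 0 := by omega
        exact mul_ne_zero hPD this
      · have hnat : (100 : Nat) ∣ p * k :=
          (dvd_hundred_mul_iff p k (by omega)).mpr dvd_rfl
        have habs : (PD * (k : Int)).natAbs = p * k := by
          rw [Int.natAbs_mul, hp]
          simp
        have := (@Int.natAbs_dvd_natAbs 100 (PD * (k : Int))).mp (by simpa [habs] using hnat)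
        simpa using this

-- ===== VERDICT (by name: the statement is the Claim_ definition above) =====
theorem solve_spec : Claim_equal_solve := by
  intro N PD PG _
  unfold Spec_solve solve solve_alt
  by_cases h0 : PG = 0
  · simp [h0]
  · by_cases h100 : PG = 100
    · simp only [h100]
      by_cases hPD : PD = 100 <;> simp [hPD]
    · by_cases hN : N ≥ 100
      · simp [h0, h100, hN]
      · simp only [if_neg h0, if_neg h100, if_neg hN]
        have hiff := loop_iff N PD
        by_cases hok : ((PySem.List.pyRange 0 (N + 1) 1).foldl
            (fun ok D =>
              if PySem.Str.slice (PySem.Int.toStr (PD * D)) (some (-2)) none = "00" then true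
              else ok) false) = true
        · obtain ⟨hPD0, hle⟩ := hiff.mp hok
          rw [hok, if_pos rfl, if_neg hPD0, if_pos hle]
        · rw [Bool.not_eq_true] at hok
          by_cases hPD0 : PD = 0
          · rw [hok, if_neg Bool.false_ne_true, if_pos hPD0]
          · have hnle : ¬ ((100 / solveAltGcdLoop (PySem.Int.mod |PD| 100).toNat 100 : Nat) : Int) ≤ N := by
              intro hle
              have hft := hiff.mpr ⟨hPD0, hle⟩
              rw [hok] at hft
              exact Bool.false_ne_true hft
            rw [hok, if_neg Bool.false_ne_true, if_neg hPD0, if_neg hnle]
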